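-- pv_equiv track=rewrite | github.com/Xilinx/Vitis-AI | tools/Vitis-AI-Profiler/xatAnalyzer/parser/function.py | isFpsCountEvent
-- ===== SOURCE A (Python) =====
-- TRACE_NAME_MASK = "__cln2_"
--
-- def isFpsCountEvent(eventName: str, type: str):
--     fpsHLCountEvents = [
--         "vitis::ai::ClassificationImp::run",
--         "vitis::ai::DetectImp::run",
--         "vitis::ai::FaceLandmarkImp::run",
--         "vitis::ai::MultiTaskImp::run_8UC1",
--         "vitis::ai::MultiTaskImp::run_8UC3",
--         "vitis::ai::OpenPoseImp::run",
--         "vitis::ai::PoseDetectImp::run",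
--         "vitis::ai::RefineDetImp::run",
--         "vitis::ai::ReidImp::run",
--         "vitis::ai::RoadLineImp::run",
--         "vitis::ai::SSDImp::run",
--         "vitis::ai::SegmentationImp::run_8UC1",
--         "vitis::ai::SegmentationImp::run_8UC3",
--         "vitis::ai::TFSSDImp::run",
--         "vitis::ai::YOLOv2Imp::run",
--         "vitis::ai::YOLOv3Imp::run",
--         "vitis::ai::FaceFeatureImp::run",
--         "vitis::ai::MedicalSegmentationImp::run",
--         "vitis::ai::PlateDetectImp::run",
--         "vitis::ai::PlateNumImp::run",
--         "vitis::ai::PlateRecogImp::run"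
--     ]
--
--     fpsLLCountEvents = [
--         "XrtCu::run"
--     ]
--
--     "By default conut for high level events"
--     eventList = fpsHLCountEvents
--     if type == "lowlevel":
--         eventList = fpsLLCountEvents
--
--     for f in eventList:
--         if eventName.find(f.replace("::", TRACE_NAME_MASK)) >= 0:
--             return True
--
--     return False
-- ===== SOURCE B (Python) =====
-- TRACE_NAME_MASK = "__cln2_"
--
-- _FPS_HL = [
--     "vitis::ai::ClassificationImp::run",
--     "vitis::ai::DetectImp::run",
--     "vitis::ai::FaceLandmarkImp::run",
--     "vitis::ai::MultiTaskImp::run_8UC1",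
--     "vitis::ai::MultiTaskImp::run_8UC3",
--     "vitis::ai::OpenPoseImp::run",
--     "vitis::ai::PoseDetectImp::run",
--     "vitis::ai::RefineDetImp::run",
--     "vitis::ai::ReidImp::run",
--     "vitis::ai::RoadLineImp::run",
--     "vitis::ai::SSDImp::run",
--     "vitis::ai::SegmentationImp::run_8UC1",
--     "vitis::ai::SegmentationImp::run_8UC3",
--     "vitis::ai::TFSSDImp::run",
--     "vitis::ai::YOLOv2Imp::run",
--     "vitis::ai::YOLOv3Imp::run",
--     "vitis::ai::FaceFeatureImp::run",
--     "vitis::ai::MedicalSegmentationImp::run",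
--     "vitis::ai::PlateDetectImp::run",
--     "vitis::ai::PlateNumImp::run",
--     "vitis::ai::PlateRecogImp::run",
-- ]
--
-- _FPS_LL = ["XrtCu::run"]
--
-- _HL_MASKED = tuple(f.replace("::", TRACE_NAME_MASK) for f in _FPS_HL)
-- _LL_MASKED = tuple(f.replace("::", TRACE_NAME_MASK) for f in _FPS_LL)
--
--
-- def isFpsCountEvent(eventName: str, type: str):
--     needles = _LL_MASKED if type == "lowlevel" else _HL_MASKED
--     for j in range(len(eventName) + 1):
--         if eventName.startswith(needles, j):
--             return True
--     return False
-- ===== Notes on version B (the rewrite author's own statement) =====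
-- stated objective: alternative
-- what changed: B pre-masks the needle lists once at module load and scans eventName position-by-position, testing every needle with startswith at each offset, instead of A's loop that re-masks each needle and runs a separate find() scan per needle.
import Mathlib
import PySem

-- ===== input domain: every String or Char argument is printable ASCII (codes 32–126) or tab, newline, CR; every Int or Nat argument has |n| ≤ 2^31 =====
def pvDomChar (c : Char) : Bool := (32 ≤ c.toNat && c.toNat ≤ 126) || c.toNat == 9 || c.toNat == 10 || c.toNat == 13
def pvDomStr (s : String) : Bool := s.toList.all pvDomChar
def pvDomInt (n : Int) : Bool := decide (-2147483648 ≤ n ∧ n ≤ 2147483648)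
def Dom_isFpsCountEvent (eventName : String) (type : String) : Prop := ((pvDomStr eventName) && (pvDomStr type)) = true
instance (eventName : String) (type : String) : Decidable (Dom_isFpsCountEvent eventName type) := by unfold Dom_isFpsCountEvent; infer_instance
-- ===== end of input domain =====

-- B pre-masks the needle lists once and scans eventName position-by-position with startswith,
-- instead of A's per-needle find() scans (objective: alternative; same return value everywhere).

-- ===== PORT A =====
def pvTraceNameMask : String := "__cln2_"

def pvFpsHLCountEvents : List String := [
  "vitis::ai::ClassificationImp::run",
  "vitis::ai::DetectImp::run",
  "vitis::ai::FaceLandmarkImp::run",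
  "vitis::ai::MultiTaskImp::run_8UC1",
  "vitis::ai::MultiTaskImp::run_8UC3",
  "vitis::ai::OpenPoseImp::run",
  "vitis::ai::PoseDetectImp::run",
  "vitis::ai::RefineDetImp::run",
  "vitis::ai::ReidImp::run",
  "vitis::ai::RoadLineImp::run",
  "vitis::ai::SSDImp::run",
  "vitis::ai::SegmentationImp::run_8UC1",
  "vitis::ai::SegmentationImp::run_8UC3",
  "vitis::ai::TFSSDImp::run",
  "vitis::ai::YOLOv2Imp::run",
  "vitis::ai::YOLOv3Imp::run",
  "vitis::ai::FaceFeatureImp::run",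
  "vitis::ai::MedicalSegmentationImp::run",
  "vitis::ai::PlateDetectImp::run",
  "vitis::ai::PlateNumImp::run",
  "vitis::ai::PlateRecogImp::run"]

def pvFpsLLCountEvents : List String := ["XrtCu::run"]

-- A's loop: for f in eventList: if eventName.find(f.replace("::", MASK)) >= 0: return True
def pvLoopA (eventName : String) : List String → Bool
  | [] => false
  | f :: rest =>
    if 0 ≤ PySem.Str.find eventName (PySem.Str.replace f "::" pvTraceNameMask) then true
    else pvLoopA eventName rest

def isFpsCountEvent (eventName : String) (type : String) : Bool :=
  let eventList := if type == "lowlevel" then pvFpsLLCountEvents else pvFpsHLCountEvents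
  pvLoopA eventName eventList

-- ===== PORT B =====
-- module-level pre-masked needle lists (Source B's _HL_MASKED / _LL_MASKED)
def pvHLMasked : List String := pvFpsHLCountEvents.map (fun f => PySem.Str.replace f "::" pvTraceNameMask)
def pvLLMasked : List String := pvFpsLLCountEvents.map (fun f => PySem.Str.replace f "::" pvTraceNameMask)

-- B's loop: for j in range(len(eventName)+1): if eventName.startswith(needles, j): return True
-- ported as structural recursion over the successive tails of the char list; Python's
-- startswith with a TUPLE at offset j is exactly 'any needle is a prefix of the j-th tail'
def pvScanB (needles : List (List Char)) : List Char → Bool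
  | [] => needles.any (fun f => PySem.Chars.startswith [] f)
  | c :: t => needles.any (fun f => PySem.Chars.startswith (c :: t) f) || pvScanB needles t

def isFpsCountEvent_alt (eventName : String) (type : String) : Bool :=
  let needles := if type == "lowlevel" then pvLLMasked else pvHLMasked
  pvScanB (needles.map String.toList) eventName.toList

-- ===== PRECONDITION & SPEC =====
def Spec_isFpsCountEvent (eventName : String) (type : String) (out : Bool) : Prop := out = isFpsCountEvent_alt eventName type
instance (eventName : String) (type : String) (out : Bool) : Decidable (Spec_isFpsCountEvent eventName type out) := by unfold Spec_isFpsCountEvent; infer_instance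

-- ===== CLAIM (what is proved, stated in full; the proofs are below) =====
def Claim_equal_isFpsCountEvent : Prop := ∀ (eventName : String) (type : String), Dom_isFpsCountEvent eventName type → Spec_isFpsCountEvent eventName type (isFpsCountEvent eventName type)

-- ===== LEMMAS AND PROOFS =====

-- A's early-return loop is an any over the needle list
theorem pvLoopA_eq_any (e : String) (l : List String) :
    pvLoopA e l = l.any (fun f => decide (0 ≤ PySem.Str.find e (PySem.Str.replace f "::" pvTraceNameMask))) := by
  induction l with
  | nil => rfl
  | cons f rest ih =>
    rw [pvLoopA, ih, List.any_cons]
    split_ifs with h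
    · rw [decide_eq_true h]; simp
    · rw [decide_eq_false h]; simp

-- B's position-major scan finds some needle iff some needle is an infix
theorem pvScanB_eq_any_isIn (needles : List (List Char)) (s : List Char) :
    pvScanB needles s = needles.any (fun f => PySem.Chars.isIn f s) := by
  induction s with
  | nil =>
    simp only [pvScanB]
    refine PySem.List.any_congr_mem (fun f _ => ?_)
    rw [Bool.eq_iff_iff, PySem.Chars.startswith_iff, PySem.Chars.isIn_iff_infix,
        List.prefix_nil, List.infix_nil]
  | cons c t ih =>
    rw [pvScanB, ih, Bool.eq_iff_iff, Bool.or_eq_true]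
    simp only [List.any_eq_true, PySem.Chars.startswith_iff, PySem.Chars.isIn_iff_infix,
        List.infix_cons_iff]
    constructor
    · rintro (⟨x, hx, h⟩ | ⟨x, hx, h⟩)
      exacts [⟨x, hx, Or.inl h⟩, ⟨x, hx, Or.inr h⟩]
    · rintro ⟨x, hx, h | h⟩
      exacts [Or.inl ⟨x, hx, h⟩, Or.inr ⟨x, hx, h⟩]

-- ===== VERDICT (by name: the statement is the Claim_ definition above) =====
theorem isFpsCountEvent_spec : Claim_equal_isFpsCountEvent := by
  intro e t _
  unfold Spec_isFpsCountEvent isFpsCountEvent isFpsCountEvent_alt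
  simp only [pvScanB_eq_any_isIn, pvLoopA_eq_any, pvHLMasked, pvLLMasked]
  split <;>
  · rw [List.map_map, List.any_map]
    refine PySem.List.any_congr_mem (fun f _ => ?_)
    rw [Bool.eq_iff_iff, decide_eq_true_iff, PySem.Str.find_nonneg_iff, Function.comp_apply,
        PySem.Chars.isIn_iff_infix]
    simp [PySem.Str.replace]
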